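-- pv_equiv track=rewrite | github.com/BAEKDODAM/algorithm | [프로그래머스]귤고르기.py | solution
-- ===== SOURCE A (Python) =====
-- def solution(k, tangerine):
--     answer=0
--     tangerineDict = dict()
--     for i in tangerine:
--         if i in tangerineDict:
--             tangerineDict[i]+=1
--         else: tangerineDict[i]=1
--
--     sortedDict = sorted(tangerineDict.items(), key=lambda item:item[1], reverse = True)
--
--     for j in sortedDict:
--         k -= j[1]
--         answer+=1
--         if k <= 0:
--             return answer
-- ===== SOURCE B (Python) =====
-- def solution(k, tangerine):
--     counts = {}
--     for t in tangerine:
--         counts[t] = counts.get(t, 0) + 1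
--     freq = {}
--     for c in counts.values():
--         freq[c] = freq.get(c, 0) + 1
--     answer = 0
--     for c in range(len(tangerine), 0, -1):
--         for _ in range(freq.get(c, 0)):
--             k -= c
--             answer += 1
--             if k <= 0:
--                 return answer
-- ===== Notes on version B (the rewrite author's own statement) =====
-- stated objective: alternative
-- what changed: B replaces A's comparison sort of (kind,count) pairs by a frequency-of-frequencies table scanned from the largest possible count down (bucket/counting order), so no sort is performed.
import Mathlib
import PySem

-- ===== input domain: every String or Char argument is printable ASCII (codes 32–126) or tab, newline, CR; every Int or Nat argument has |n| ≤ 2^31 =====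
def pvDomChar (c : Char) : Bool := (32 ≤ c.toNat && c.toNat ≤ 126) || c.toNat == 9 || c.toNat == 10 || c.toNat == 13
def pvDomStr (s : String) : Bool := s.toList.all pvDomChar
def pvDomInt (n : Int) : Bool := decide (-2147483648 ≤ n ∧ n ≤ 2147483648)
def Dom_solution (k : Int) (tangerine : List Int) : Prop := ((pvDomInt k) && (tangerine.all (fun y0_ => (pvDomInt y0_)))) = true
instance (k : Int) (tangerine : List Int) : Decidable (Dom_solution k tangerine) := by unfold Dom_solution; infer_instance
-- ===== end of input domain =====

-- B replaces A's comparison sort of (kind,count) pairs by a frequency-of-frequencies table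
-- scanned from the largest possible count down (bucket order); same value everywhere A returns an int.

-- ===== PORT A =====
-- A's final for-loop with early return; `none` = the Python falls off the loop and returns None (outside Pre_)
def solLoopA : List (Int × Int) → Int → Int → Option Int
  | [], _, _ => none
  | j :: rest, k, answer =>
    let k' := k - j.2
    let answer' := answer + 1
    if k' ≤ 0 then some answer' else solLoopA rest k' answer'

def solution (k : Int) (tangerine : List Int) : Int :=
  let tangerineDict := tangerine.foldl
    (fun d i => if d.contains i then d.modify i 0 (· + 1) else d.insert i 1)
    PySem.Dict.empty
  let sortedDict := PySem.List.sorted tangerineDict.items (fun item => item.2) true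
  (solLoopA sortedDict k 0).getD 0

-- ===== PORT B =====
-- inner `for _ in range(freq.get(c, 0))` loop; returns (early-return value?, k, answer)
def solInnerB (c : Int) : Nat → Int → Int → Option Int × Int × Int
  | 0, k, answer => (none, k, answer)
  | t + 1, k, answer =>
    let k' := k - c
    let answer' := answer + 1
    if k' ≤ 0 then (some answer', k', answer') else solInnerB c t k' answer'

-- outer `for c in range(len(tangerine), 0, -1)` loop
def solOuterB (freq : PySem.Dict Int Int) : List Int → Int → Int → Option Int
  | [], _, _ => none
  | c :: cs, k, answer =>
    match solInnerB c (freq.getD c 0).toNat k answer with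
    | (some r, _, _) => some r
    | (none, k', answer') => solOuterB freq cs k' answer'

def solution_alt (k : Int) (tangerine : List Int) : Int :=
  let counts := tangerine.foldl (fun d t => d.insert t (d.getD t 0 + 1)) PySem.Dict.empty
  let freq := counts.values.foldl (fun d c => d.insert c (d.getD c 0 + 1)) PySem.Dict.empty
  (solOuterB freq (PySem.List.pyRange (tangerine.length : Int) 0 (-1)) k 0).getD 0

-- ===== PRECONDITION & SPEC =====
-- Pre_ excludes exactly the inputs where A's loop exhausts and the Python returns None (not an int):
-- the empty list, and k greater than the total number of tangerines.
def Pre_solution (k : Int) (tangerine : List Int) : Prop :=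
  tangerine ≠ [] ∧ k ≤ (tangerine.length : Int)
instance (k : Int) (tangerine : List Int) : Decidable (Pre_solution k tangerine) := by
  unfold Pre_solution; infer_instance
def pvWitness_solution : Int × List Int := (2, [1, 1, 2])

def Spec_solution (k : Int) (tangerine : List Int) (out : Int) : Prop := out = solution_alt k tangerine
instance (k : Int) (tangerine : List Int) (out : Int) : Decidable (Spec_solution k tangerine out) := by
  unfold Spec_solution; infer_instance

-- ===== CLAIM (what is proved, stated in full; the proofs are below) =====
def Claim_equal_solution : Prop := ∀ (k : Int) (tangerine : List Int), Dom_solution k tangerine → Pre_solution k tangerine → Spec_solution k tangerine (solution k tangerine)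

-- ===== LEMMAS AND PROOFS =====

-- the common core loop: consume a list of counts, early-return the number of kinds used
def cRun : List Int → Int → Int → Option Int × Int × Int
  | [], k, a => (none, k, a)
  | c :: cs, k, a =>
    let k' := k - c
    let a' := a + 1
    if k' ≤ 0 then (some a', k', a') else cRun cs k' a'

theorem solLoopA_eq_cRun (l : List (Int × Int)) (k a : Int) :
    solLoopA l k a = (cRun (l.map (fun p => p.2)) k a).1 := by
  induction l generalizing k a with
  | nil => rfl
  | cons j rest ih =>
    simp only [solLoopA, cRun, List.map]
    split_ifs <;> simp [ih]

theorem solInnerB_eq_cRun (c : Int) (t : Nat) (k a : Int) :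
    solInnerB c t k a = cRun (List.replicate t c) k a := by
  induction t generalizing k a with
  | zero => rfl
  | succ t ih =>
    simp only [solInnerB, cRun, List.replicate]
    split_ifs <;> simp [ih]

theorem cRun_append (l₁ l₂ : List Int) (k a : Int) :
    cRun (l₁ ++ l₂) k a =
      match cRun l₁ k a with
      | (some r, k', a') => (some r, k', a')
      | (none, k', a') => cRun l₂ k' a' := by
  induction l₁ generalizing k a with
  | nil => simp [cRun]
  | cons c cs ih =>
    simp only [List.cons_append, cRun]
    split_ifs <;> simp [ih]

theorem solOuterB_eq_cRun (freq : PySem.Dict Int Int) (cs : List Int) (k a : Int) :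
    solOuterB freq cs k a =
      (cRun (cs.flatMap (fun c => List.replicate (freq.getD c 0).toNat c)) k a).1 := by
  induction cs generalizing k a with
  | nil => rfl
  | cons c cs ih =>
    simp only [solOuterB, List.flatMap_cons, cRun_append, solInnerB_eq_cRun]
    rcases h : cRun (List.replicate (freq.getD c 0).toNat c) k a with ⟨r, k', a'⟩
    cases r <;> simp [ih]

-- pointwise congruence for flatMap
theorem flatMap_congr_mem {α β : Type} (l : List α) (f g : α → List β)
    (h : ∀ c ∈ l, f c = g c) : l.flatMap f = l.flatMap g := by
  induction l with
  | nil => rfl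
  | cons c cs ih =>
    simp only [List.flatMap_cons]
    rw [h c (by simp), ih (fun x hx => h x (by simp [hx]))]

-- membership in the bucket concatenation
theorem mem_bucketSeq {x : Int} {m : Int} {cnt : Int → Nat}
    (h : x ∈ (PySem.List.pyRange m 0 (-1)).flatMap (fun c => List.replicate (cnt c) c)) :
    1 ≤ x ∧ x ≤ m := by
  simp only [List.mem_flatMap] at h
  obtain ⟨c, hc, hx⟩ := h
  rw [PySem.List.mem_pyRange_neg_one] at hc
  rw [List.eq_of_mem_replicate hx]
  omega

-- the bucket concatenation is descending
theorem bucketSeq_pairwise (m : Nat) (cnt : Int → Nat) :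
    ((PySem.List.pyRange (m : Int) 0 (-1)).flatMap
      (fun c => List.replicate (cnt c) c)).Pairwise (fun a b => b ≤ a) := by
  induction m with
  | zero => simp [PySem.List.pyRange_neg_one_eq_nil]
  | succ m ih =>
    rw [PySem.List.pyRange_neg_one_cons (by exact_mod_cast Nat.succ_pos m)]
    have hcast : (((m + 1 : Nat) : Int)) - 1 = (m : Int) := by push_cast; ring
    simp only [List.flatMap_cons]
    rw [List.pairwise_append, hcast]
    refine ⟨List.pairwise_replicate.2 (by simp), ih, ?_⟩
    intro a ha b hb
    have hb' := mem_bucketSeq (m := (m : Int)) (cnt := cnt) hb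
    rw [List.eq_of_mem_replicate ha]
    push_cast
    omega

-- the bucket concatenation is a permutation of the count list
theorem bucketSeq_perm (m : Nat) (v : List Int)
    (hv : ∀ x ∈ v, 1 ≤ x ∧ x ≤ (m : Int)) :
    ((PySem.List.pyRange (m : Int) 0 (-1)).flatMap
      (fun c => List.replicate (v.count c) c)).Perm v := by
  induction m generalizing v with
  | zero =>
    have : v = [] := by
      cases v with
      | nil => rfl
      | cons x xs => exact absurd (hv x (by simp)) (by push_cast; omega)
    simp [this, PySem.List.pyRange_neg_one_eq_nil]
  | succ m ih =>
    rw [PySem.List.pyRange_neg_one_cons (by exact_mod_cast Nat.succ_pos m)]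
    have hm : (((m + 1 : Nat) : Int)) - 1 = (m : Int) := by push_cast; ring
    simp only [List.flatMap_cons]
    rw [hm]
    set v' := v.filter (fun x => !(x == (((m + 1 : Nat) : Int)))) with hv'
    have hcong : (PySem.List.pyRange (m : Int) 0 (-1)).flatMap
          (fun c => List.replicate (v.count c) c)
        = (PySem.List.pyRange (m : Int) 0 (-1)).flatMap
          (fun c => List.replicate (v'.count c) c) := by
      apply flatMap_congr_mem
      intro c hc
      rw [PySem.List.mem_pyRange_neg_one] at hc
      have : v'.count c = v.count c := by
        rw [hv']
        exact List.count_filter (by simp; omega)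
      rw [this]
    rw [hcong]
    have hperm' : ((PySem.List.pyRange (m : Int) 0 (-1)).flatMap
        (fun c => List.replicate (v'.count c) c)).Perm v' := by
      apply ih
      intro x hx
      rw [hv', List.mem_filter] at hx
      have := hv x hx.1
      have hne : x ≠ (m : Int) + 1 := by simpa using hx.2
      omega
    have hrep : List.replicate (v.count (((m + 1 : Nat) : Int))) (((m + 1 : Nat) : Int))
        = v.filter (fun x => x == (((m + 1 : Nat) : Int))) := by
      rw [List.filter_beq]
    have h1 : (List.replicate (v.count (((m + 1 : Nat) : Int))) (((m + 1 : Nat) : Int)) ++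
          (PySem.List.pyRange (m : Int) 0 (-1)).flatMap
            (fun c => List.replicate (v'.count c) c)).Perm
        (v.filter (fun x => x == (((m + 1 : Nat) : Int))) ++ v') := by
      rw [hrep]; exact (hperm'.append_left _)
    exact h1.trans (List.filter_append_perm _ v)

-- A's counting loop builds Counter(tangerine)
theorem insert_one_eq_modify (d : PySem.Dict Int Int) (i : Int) (h : d.contains i = false) :
    d.insert i 1 = d.modify i 0 (· + 1) := by
  simp [PySem.Dict.insert, PySem.Dict.modify, h, PySem.Dict.getD_of_not_contains]

theorem foldA_eq_counter (xs : List Int) :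
    xs.foldl (fun d i => if d.contains i then d.modify i 0 (· + 1) else d.insert i 1)
      PySem.Dict.empty = PySem.Dict.counter xs := by
  rw [PySem.Dict.counter_eq_foldl]
  apply PySem.List.foldl_congr_mem
  intro d x _
  by_cases h : d.contains x = true
  · simp [h]
  · simp only [Bool.not_eq_true] at h
    simp [h, insert_one_eq_modify d x h]

-- bounds on the values of Counter(xs)
theorem counter_values_bounds (xs : List Int) :
    ∀ x ∈ (PySem.Dict.counter xs).values, 1 ≤ x ∧ x ≤ (xs.length : Int) := by
  intro x hx
  rw [PySem.Dict.values_eq_map_keys _ (PySem.Dict.nodup_keys_counter xs) 0] at hx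
  simp only [List.mem_map] at hx
  obtain ⟨c, hc, rfl⟩ := hx
  rw [PySem.Dict.keys_counter] at hc
  have hmem : c ∈ xs := (PySem.Set.mem_ofList xs c).1 hc
  rw [PySem.Dict.getD_counter]
  constructor
  · exact_mod_cast List.count_pos_iff.2 hmem
  · exact_mod_cast List.count_le_length

-- the two count sequences coincide: sorting the counts descending = scanning buckets top-down
theorem seq_eq (xs : List Int) :
    ((PySem.List.sorted (PySem.Dict.counter xs).items (fun item => item.2) true).map
        (fun p => p.2))
      = (PySem.List.pyRange (xs.length : Int) 0 (-1)).flatMap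
          (fun c => List.replicate (((PySem.Dict.counter xs).values).count c) c) := by
  have vb := counter_values_bounds xs
  apply List.Perm.eq_of_pairwise (le := fun a b : Int => b ≤ a)
  · exact fun a b _ _ h1 h2 => le_antisymm h2 h1
  · -- LHS descending
    have := PySem.List.sorted_pairwise_rev (PySem.Dict.counter xs).items (fun item => item.2)
    exact List.pairwise_map.2 this
  · -- RHS descending
    exact bucketSeq_pairwise xs.length _
  · -- both are permutations of the values list
    have h1 : ((PySem.List.sorted (PySem.Dict.counter xs).items (fun item => item.2) true).map
        (fun p => p.2)).Perm ((PySem.Dict.counter xs).values) :=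
      (PySem.List.sorted_perm _ _ _).map _
    exact h1.trans (bucketSeq_perm xs.length _ vb).symm

-- ===== VERDICT (by name: the statement is the Claim_ definition above) =====
theorem solution_spec : Claim_equal_solution := by
  intro k tangerine _ _
  unfold Spec_solution solution solution_alt
  simp only [foldA_eq_counter, PySem.Dict.foldl_insert_getD_add_one_eq_counter,
    solLoopA_eq_cRun, solOuterB_eq_cRun, PySem.Dict.getD_counter, Int.toNat_natCast]
  rw [seq_eq]
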